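-- pv_equiv track=rewrite | github.com/neerajrush/Samples | theif-jumps.py | numberOfAppttempts
-- ===== SOURCE A (Python) =====
-- def numberOfAppttempts(nWalls, wallsHeight, jump, slip):
-- 	nattempts = 0
-- 	for i in range(nWalls):
-- 		if jump >= wallsHeight[i]:
-- 			nattempts += 1
-- 		else:
-- 			nattempts += 1
-- 			j = jump
-- 			while (j < wallsHeight[i]):
-- 				j -= slip
-- 				nattempts += 1
-- 				j += jump
--
-- 	return nattempts
-- ===== SOURCE B (Python) =====
-- def numberOfAppttempts(nWalls, wallsHeight, jump, slip):
--     total = 0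
--     for h in wallsHeight[:max(nWalls, 0)]:
--         if jump >= h:
--             total += 1
--         else:
--             total += 1 + -((-(h - jump)) // (jump - slip))
--     return total
-- ===== Notes on version B (the rewrite author's own statement) =====
-- stated objective: alternative
-- what changed: Replaces the per-wall simulation while-loop with a closed-form ceiling-division count of attempts per wall (1 + ceil((h-jump)/(jump-slip))), iterating once over the first nWalls heights; Pre_ excludes only inputs where A does not return (IndexError when nWalls > len(wallsHeight), divergence when some counted wall exceeds jump with slip >= jump).
import Mathlib
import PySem

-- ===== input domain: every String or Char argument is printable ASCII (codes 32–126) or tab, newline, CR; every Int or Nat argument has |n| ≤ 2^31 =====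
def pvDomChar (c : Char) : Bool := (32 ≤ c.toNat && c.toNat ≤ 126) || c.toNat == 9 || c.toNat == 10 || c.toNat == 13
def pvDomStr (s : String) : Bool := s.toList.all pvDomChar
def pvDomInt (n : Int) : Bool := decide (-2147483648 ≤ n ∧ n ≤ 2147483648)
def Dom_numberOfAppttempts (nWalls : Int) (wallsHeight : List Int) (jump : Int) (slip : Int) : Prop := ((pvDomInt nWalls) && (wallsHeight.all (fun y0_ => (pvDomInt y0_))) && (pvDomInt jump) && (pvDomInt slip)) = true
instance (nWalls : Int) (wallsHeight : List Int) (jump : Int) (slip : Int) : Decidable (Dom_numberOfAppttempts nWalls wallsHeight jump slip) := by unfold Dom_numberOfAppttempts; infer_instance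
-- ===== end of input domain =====

-- B replaces A's per-wall simulation while-loop with a closed-form ceiling-division count per wall (alternative algorithm).

-- ===== PORT A =====
-- A's inner 'while j < h: j -= slip; j += jump' counting iterations.  The 'else 0'
-- branch for slip ≥ jump only makes the recursion total (Python diverges there; Pre_ excludes it).
def pvInnerA (h jump slip j : Int) : Int :=
  if _hj : j < h then
    if _hs : slip < jump then 1 + pvInnerA h jump slip (j - slip + jump)
    else 0
  else 0
termination_by (h - j).toNat
decreasing_by omega

def numberOfAppttempts (nWalls : Int) (wallsHeight : List Int) (jump : Int) (slip : Int) : Int :=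
  (PySem.List.pyRange 0 nWalls 1).foldl
    (fun nattempts i =>
      let h := PySem.List.pyGetD wallsHeight i 0   -- Pre_ guarantees the index is in range
      if jump ≥ h then nattempts + 1
      else nattempts + 1 + pvInnerA h jump slip jump)
    0

-- ===== PORT B =====
def numberOfAppttempts_alt (nWalls : Int) (wallsHeight : List Int) (jump : Int) (slip : Int) : Int :=
  (PySem.List.slice wallsHeight none (some (max nWalls 0))).foldl
    (fun total h =>
      if jump ≥ h then total + 1
      else total + (1 + -(PySem.Int.floordiv (-(h - jump)) (jump - slip))))
    0

-- ===== PRECONDITION & SPEC =====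
-- Pre_ = exactly where Python A returns: the indices 0..nWalls-1 exist, and every counted
-- wall is either cleared in one jump or jump > slip (otherwise the while-loop never ends).
def Pre_numberOfAppttempts (nWalls : Int) (wallsHeight : List Int) (jump : Int) (slip : Int) : Prop :=
  nWalls ≤ wallsHeight.length ∧ ∀ h ∈ wallsHeight.take nWalls.toNat, h ≤ jump ∨ slip < jump

instance (nWalls : Int) (wallsHeight : List Int) (jump : Int) (slip : Int) : Decidable (Pre_numberOfAppttempts nWalls wallsHeight jump slip) := by unfold Pre_numberOfAppttempts; infer_instance

def pvWitness_numberOfAppttempts : Int × List Int × Int × Int := (3, [2, 10, 7], 4, 1)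

def Spec_numberOfAppttempts (nWalls : Int) (wallsHeight : List Int) (jump : Int) (slip : Int) (out : Int) : Prop := out = numberOfAppttempts_alt nWalls wallsHeight jump slip
instance (nWalls : Int) (wallsHeight : List Int) (jump : Int) (slip : Int) (out : Int) : Decidable (Spec_numberOfAppttempts nWalls wallsHeight jump slip out) := by unfold Spec_numberOfAppttempts; infer_instance

-- ===== CLAIM (what is proved, stated in full; the proofs are below) =====
def Claim_equal_numberOfAppttempts : Prop := ∀ (nWalls : Int) (wallsHeight : List Int) (jump : Int) (slip : Int), Dom_numberOfAppttempts nWalls wallsHeight jump slip → Pre_numberOfAppttempts nWalls wallsHeight jump slip → Spec_numberOfAppttempts nWalls wallsHeight jump slip (numberOfAppttempts nWalls wallsHeight jump slip)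

-- ===== LEMMAS AND PROOFS =====

-- Bracket invariant of the simulated loop: its count q satisfies (q-1)*d < h-j ≤ q*d.
lemma pvInnerA_bracket (h jump slip j : Int) (hs : slip < jump) (hj : j < h) :
    (pvInnerA h jump slip j - 1) * (jump - slip) < h - j ∧
      h - j ≤ pvInnerA h jump slip j * (jump - slip) := by
  generalize hm : (h - j).toNat = m
  induction m using Nat.strong_induction_on generalizing j with
  | _ m ih =>
    rw [pvInnerA, dif_pos hj, dif_pos hs]
    by_cases h2 : j - slip + jump < h
    · have hlt : (h - (j - slip + jump)).toNat < m := by omega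
      obtain ⟨l, r⟩ := ih _ hlt _ h2 rfl
      constructor <;> nlinarith
    · constructor <;>
      · rw [pvInnerA, dif_neg h2]
        nlinarith

-- The simulated count equals Python's ceiling division  -((-(h-j)) // (jump-slip)).
lemma pvInnerA_eq_ceil (h jump slip j : Int) (hs : slip < jump) (hj : j < h) :
    pvInnerA h jump slip j = -(PySem.Int.floordiv (-(h - j)) (jump - slip)) := by
  have hd : (0:Int) < jump - slip := by omega
  exact ((PySem.Int.neg_floordiv_neg_eq_iff_of_pos hd).mpr (pvInnerA_bracket h jump slip j hs hj)).symm

-- A's index loop over range(nWalls) is the fold of f over the first nWalls heights.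
lemma pvFold_range_take (f : Int → Int → Int) :
    ∀ (m : Nat) (xs : List Int) (n : Int) (init : Int), n.toNat = m → n ≤ xs.length →
      (PySem.List.pyRange 0 n 1).foldl (fun acc i => f acc (PySem.List.pyGetD xs i 0)) init
        = (xs.take m).foldl f init := by
  intro m
  induction m with
  | zero =>
    intro xs n init hm hn
    have hle : n ≤ 0 := by omega
    rw [PySem.List.pyRange_one_eq_nil hle]
    simp
  | succ k ih =>
    intro xs n init hm hn
    have hpos : 0 < n := by omega
    have hcons : PySem.List.pyRange 0 n 1 = 0 :: PySem.List.pyRange 1 n 1 :=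
      PySem.List.pyRange_one_cons hpos
    obtain ⟨x, rest, rfl⟩ : ∃ x rest, xs = x :: rest := by
      cases xs with
      | nil => simp at hn; omega
      | cons x rest => exact ⟨x, rest, rfl⟩
    have h0 : PySem.List.pyGetD (x :: rest) 0 0 = x := by
      simp

    have hmap : PySem.List.pyRange 1 n 1 = (PySem.List.pyRange 0 (n - 1) 1).map (· + 1) := by
      rw [PySem.List.pyRange_one 1 n, PySem.List.pyRange_one 0 (n - 1), List.map_map]
      have e : n - 1 - 0 = n - 1 := by ring
      rw [e]
      refine List.map_congr_left ?_
      intro a _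
      simp [Function.comp]
      omega
    rw [hcons]
    simp only [List.foldl_cons]
    rw [h0, hmap, List.foldl_map]
    have hsh :
        (PySem.List.pyRange 0 (n - 1) 1).foldl
            (fun acc i => f acc (PySem.List.pyGetD (x :: rest) (i + 1) 0)) (f init x)
          = (PySem.List.pyRange 0 (n - 1) 1).foldl
              (fun acc i => f acc (PySem.List.pyGetD rest i 0)) (f init x) := by
      apply PySem.List.foldl_congr_mem
      intro acc i hi
      have hge : 0 ≤ i := by
        have := PySem.List.mem_pyRange_one.mp hi
        omega
      obtain ⟨a, rfl⟩ := Int.eq_ofNat_of_zero_le hge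
      congr 1
      have e1 : ((a : Int) + 1) = (((a + 1 : Nat)) : Int) := by push_cast; ring
      rw [e1, PySem.List.pyGetD_natCast, PySem.List.pyGetD_natCast]
      simp
    rw [hsh, List.take_succ_cons]
    simp only [List.foldl_cons]
    exact ih rest (n - 1) (f init x) (by omega) (by simp at hn ⊢; omega)

-- ===== VERDICT (by name: the statement is the Claim_ definition above) =====
theorem numberOfAppttempts_spec : Claim_equal_numberOfAppttempts := by
  intro nWalls wallsHeight jump slip _hdom hpre
  obtain ⟨hlen, hwalls⟩ := hpre
  show numberOfAppttempts nWalls wallsHeight jump slip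
      = numberOfAppttempts_alt nWalls wallsHeight jump slip
  have hslice : PySem.List.slice wallsHeight none (some (max nWalls 0))
      = wallsHeight.take nWalls.toNat := by
    have h1 := PySem.List.slice_to wallsHeight (b := max nWalls 0) (le_max_right _ _)
    have h2 : (max nWalls 0).toNat = nWalls.toNat := by omega
    rw [h2] at h1
    exact h1
  have hA : numberOfAppttempts nWalls wallsHeight jump slip
      = (wallsHeight.take nWalls.toNat).foldl
          (fun acc h => if jump ≥ h then acc + 1 else acc + 1 + pvInnerA h jump slip jump) 0 :=
    pvFold_range_take
      (fun acc h => if jump ≥ h then acc + 1 else acc + 1 + pvInnerA h jump slip jump)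
      nWalls.toNat wallsHeight nWalls 0 rfl hlen
  have hB : numberOfAppttempts_alt nWalls wallsHeight jump slip
      = (wallsHeight.take nWalls.toNat).foldl
          (fun total h => if jump ≥ h then total + 1
            else total + (1 + -(PySem.Int.floordiv (-(h - jump)) (jump - slip)))) 0 :=
    congrArg
      (fun l => l.foldl
        (fun total h => if jump ≥ h then total + 1
          else total + (1 + -(PySem.Int.floordiv (-(h - jump)) (jump - slip)))) 0)
      hslice
  rw [hA, hB]
  apply PySem.List.foldl_congr_mem
  intro acc h hmem
  by_cases hc : jump ≥ h
  · simp [hc]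
  · rw [if_neg hc, if_neg hc]
    have hs : slip < jump := by
      rcases hwalls h hmem with h1 | h2
      · omega
      · exact h2
    rw [pvInnerA_eq_ceil h jump slip jump hs (by omega)]
    ring
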